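-- pv_equiv track=rewrite | github.com/TechnoBlogger14o3/leetcode-solutions | Easy/2025-12-13-3606-Coupon-Code-Validator/solution.py | couponCodes
-- ===== SOURCE A (Python) =====
-- from typing import List
--
-- def couponCodes(code: List[str], businessLine: List[str], isActive: List[bool]) -> List[str]:
--     valid_business_lines = {"electronics": 0, "grocery": 1, "pharmacy": 2, "restaurant": 3}
--
--     valid_coupons = []
--
--     for c, bl, active in zip(code, businessLine, isActive):
--         if (c and c.replace('_', '').isalnum() and
--             bl in valid_business_lines and
--             active):
--             valid_coupons.append((bl, c))
--
--     valid_coupons.sort(key=lambda x: (valid_business_lines[x[0]], x[1]))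
--
--     return [c for _, c in valid_coupons]
-- ===== SOURCE B (Python) =====
-- from typing import List
--
-- def couponCodes(code: List[str], businessLine: List[str], isActive: List[bool]) -> List[str]:
--     # Bucket valid codes per business line, sort each bucket, concatenate in rank order.
--     elec, groc, phar, rest = [], [], [], []
--     for c, bl, active in zip(code, businessLine, isActive):
--         if c and c.replace('_', '').isalnum() and active:
--             if bl == "electronics":
--                 elec.append(c)
--             elif bl == "grocery":
--                 groc.append(c)
--             elif bl == "pharmacy":
--                 phar.append(c)
--             elif bl == "restaurant":
--                 rest.append(c)
--     return sorted(elec) + sorted(groc) + sorted(phar) + sorted(rest)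
-- ===== Notes on version B (the rewrite author's own statement) =====
-- stated objective: alternative
-- what changed: Replaces the single global sort on a composite (business-line rank, code) key by partitioning valid codes into four per-business-line buckets, sorting each bucket by code alone, and concatenating the buckets in fixed rank order.
import Mathlib
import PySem

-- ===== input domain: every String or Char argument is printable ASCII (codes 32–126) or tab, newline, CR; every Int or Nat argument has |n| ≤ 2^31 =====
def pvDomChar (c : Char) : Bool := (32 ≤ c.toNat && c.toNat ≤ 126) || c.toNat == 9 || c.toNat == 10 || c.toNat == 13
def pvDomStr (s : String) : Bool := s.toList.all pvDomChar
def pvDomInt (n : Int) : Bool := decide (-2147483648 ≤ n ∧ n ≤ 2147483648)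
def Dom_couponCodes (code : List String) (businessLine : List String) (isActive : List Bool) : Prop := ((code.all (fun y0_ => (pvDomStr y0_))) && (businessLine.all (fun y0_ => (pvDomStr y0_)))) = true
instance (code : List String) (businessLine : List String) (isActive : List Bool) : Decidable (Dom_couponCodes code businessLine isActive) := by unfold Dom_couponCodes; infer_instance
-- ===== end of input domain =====

-- B replaces A's single sort on a composite (rank, code) key by four per-business-line
-- buckets, each sorted by code alone and concatenated in fixed rank order (objective: alternative).

-- ===== PORT A =====
-- shared validity test: `c and c.replace('_','').isalnum()` (identical in both Pythons)
def pvBase (c : String) : Bool := (c != "") && PySem.Str.strIsalnum (PySem.Str.replace c "_" "")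

-- the dict literal valid_business_lines
def pvVBL : PySem.Dict String Int :=
  ⟨[("electronics", 0), ("grocery", 1), ("pharmacy", 2), ("restaurant", 3)]⟩

def couponCodes (code : List String) (businessLine : List String) (isActive : List Bool) : List String :=
  let valid := (code.zip (businessLine.zip isActive)).foldl
    (fun acc t =>
      if pvBase t.1 && (pvVBL.get? t.2.1).isSome && t.2.2 then acc ++ [(t.2.1, t.1)] else acc) []
  (PySem.List.sorted2 valid (fun x => PySem.Dict.getD pvVBL x.1 0) (fun x => x.2)).map (fun x => x.2)

-- ===== PORT B =====
def couponCodes_alt (code : List String) (businessLine : List String) (isActive : List Bool) : List String :=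
  let bs := (code.zip (businessLine.zip isActive)).foldl
    (fun (bs : List String × List String × List String × List String) t =>
      if pvBase t.1 && t.2.2 then
        if t.2.1 == "electronics" then (bs.1 ++ [t.1], bs.2.1, bs.2.2.1, bs.2.2.2)
        else if t.2.1 == "grocery" then (bs.1, bs.2.1 ++ [t.1], bs.2.2.1, bs.2.2.2)
        else if t.2.1 == "pharmacy" then (bs.1, bs.2.1, bs.2.2.1 ++ [t.1], bs.2.2.2)
        else if t.2.1 == "restaurant" then (bs.1, bs.2.1, bs.2.2.1, bs.2.2.2 ++ [t.1])
        else bs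
      else bs) ([], [], [], [])
  PySem.List.sorted bs.1 (fun x => x) ++ PySem.List.sorted bs.2.1 (fun x => x) ++
    PySem.List.sorted bs.2.2.1 (fun x => x) ++ PySem.List.sorted bs.2.2.2 (fun x => x)

-- ===== PRECONDITION & SPEC =====
def Spec_couponCodes (code : List String) (businessLine : List String) (isActive : List Bool) (out : List String) : Prop := out = couponCodes_alt code businessLine isActive
instance (code : List String) (businessLine : List String) (isActive : List Bool) (out : List String) : Decidable (Spec_couponCodes code businessLine isActive out) := by unfold Spec_couponCodes; infer_instance

-- ===== CLAIM (what is proved, stated in full; the proofs are below) =====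
def Claim_equal_couponCodes : Prop := ∀ (code : List String) (businessLine : List String) (isActive : List Bool), Dom_couponCodes code businessLine isActive → Spec_couponCodes code businessLine isActive (couponCodes code businessLine isActive)

-- ===== LEMMAS AND PROOFS =====

-- the lexicographic key of A's sort
def pvKlex (x : String × String) : Lex (Int × String) := toLex (PySem.Dict.getD pvVBL x.1 0, x.2)

-- A's filter predicate and B's per-bucket filter predicate, over zipped triples
def pvPA (t : String × String × Bool) : Bool := pvBase t.1 && (pvVBL.get? t.2.1).isSome && t.2.2
def pvPB (l : String) (t : String × String × Bool) : Bool := (pvBase t.1 && t.2.2) && (t.2.1 == l)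

theorem pv_sorted2_eq_sorted_lex {α : Type} (xs : List α) (k1 : α → Int) (k2 : α → String) :
    PySem.List.sorted2 xs k1 k2 = PySem.List.sorted xs (fun x => toLex (k1 x, k2 x)) := by
  show List.foldl _ [] xs = List.foldl _ [] xs
  have h : (fun a b => decide (k1 a < k1 b) || (!decide (k1 b < k1 a) && decide (k2 a < k2 b)))
      = (fun a b => decide ((toLex (k1 a, k2 a) : Lex (Int × String)) < toLex (k1 b, k2 b))) := by
    funext a b
    rcases lt_trichotomy (k1 a) (k1 b) with h | h | h
    · simp [Prod.Lex.lt_iff, h]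
    · simp [Prod.Lex.lt_iff, h, lt_irrefl]
    · simp [Prod.Lex.lt_iff, h, lt_asymm h, h.ne', not_lt_of_gt h]
  rw [h]

theorem pv_foldA (zs : List (String × String × Bool)) (acc : List (String × String)) :
    zs.foldl (fun acc t => if pvBase t.1 && (pvVBL.get? t.2.1).isSome && t.2.2
        then acc ++ [(t.2.1, t.1)] else acc) acc
      = acc ++ (zs.filter pvPA).map (fun t => (t.2.1, t.1)) := by
  induction zs generalizing acc with
  | nil => simp
  | cons t zs ih =>
    simp only [List.foldl_cons, List.filter_cons]
    by_cases h : pvPA t = true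
    · rw [if_pos (by simpa [pvPA] using h), ih]
      simp [h]
    · rw [if_neg (by simpa [pvPA] using h), ih]
      simp [h]

theorem pv_foldB (zs : List (String × String × Bool))
    (bs : List String × List String × List String × List String) :
    zs.foldl (fun (bs : List String × List String × List String × List String) t =>
      if pvBase t.1 && t.2.2 then
        if t.2.1 == "electronics" then (bs.1 ++ [t.1], bs.2.1, bs.2.2.1, bs.2.2.2)
        else if t.2.1 == "grocery" then (bs.1, bs.2.1 ++ [t.1], bs.2.2.1, bs.2.2.2)
        else if t.2.1 == "pharmacy" then (bs.1, bs.2.1, bs.2.2.1 ++ [t.1], bs.2.2.2)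
        else if t.2.1 == "restaurant" then (bs.1, bs.2.1, bs.2.2.1, bs.2.2.2 ++ [t.1])
        else bs
      else bs) bs
    = (bs.1 ++ (zs.filter (pvPB "electronics")).map (fun t => t.1),
       bs.2.1 ++ (zs.filter (pvPB "grocery")).map (fun t => t.1),
       bs.2.2.1 ++ (zs.filter (pvPB "pharmacy")).map (fun t => t.1),
       bs.2.2.2 ++ (zs.filter (pvPB "restaurant")).map (fun t => t.1)) := by
  induction zs generalizing bs with
  | nil => simp
  | cons t zs ih =>
    simp only [List.foldl_cons, List.filter_cons]
    by_cases hb : (pvBase t.1 && t.2.2) = true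
    · rw [if_pos hb]
      by_cases he : t.2.1 = "electronics"
      · rw [if_pos (by simp [he]), ih]
        simp [pvPB, hb, he]
      · rw [if_neg (by simp [he])]
        by_cases hg : t.2.1 = "grocery"
        · rw [if_pos (by simp [hg]), ih]
          simp [pvPB, hb, he, hg]
        · rw [if_neg (by simp [hg])]
          by_cases hp : t.2.1 = "pharmacy"
          · rw [if_pos (by simp [hp]), ih]
            simp [pvPB, hb, he, hg, hp]
          · rw [if_neg (by simp [hp])]
            by_cases hr : t.2.1 = "restaurant"
            · rw [if_pos (by simp [hr]), ih]
              simp [pvPB, hb, he, hg, hp, hr]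
            · rw [if_neg (by simp [hr]), ih]
              simp [pvPB, hb, he, hg, hp, hr]
    · rw [if_neg hb, ih]
      simp [pvPB, hb]

theorem pv_get?_isSome (s : String) :
    ((pvVBL.get? s).isSome = true)
      ↔ (s = "electronics" ∨ s = "grocery" ∨ s = "pharmacy" ∨ s = "restaurant") := by
  by_cases he : s = "electronics"
  · simp [pvVBL, PySem.Dict.get?, he]
  · by_cases hg : s = "grocery"
    · simp [pvVBL, PySem.Dict.get?, List.find?, hg]
    · by_cases hp : s = "pharmacy"
      · simp [pvVBL, PySem.Dict.get?, List.find?, hp]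
      · by_cases hr : s = "restaurant"
        · simp [pvVBL, PySem.Dict.get?, List.find?, hr]
        · have hnone : List.find? (fun p => p.1 == s) pvVBL.items = none := by
            rw [List.find?_eq_none]
            intro a ha
            simp only [pvVBL, List.mem_cons, List.not_mem_nil, or_false] at ha
            rcases ha with rfl | rfl | rfl | rfl <;>
              simp [beq_iff_eq, Ne.symm he, Ne.symm hg, Ne.symm hp, Ne.symm hr]
          simp [PySem.Dict.get?, hnone, he, hg, hp, hr]

-- V.filter (·.1 == l) for a valid line l is the bucket of l, paired with l
theorem pv_filter_V (zs : List (String × String × Bool)) (l : String)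
    (hl : (pvVBL.get? l).isSome = true) :
    ((zs.filter pvPA).map (fun t => (t.2.1, t.1))).filter (fun x => x.1 == l)
      = ((zs.filter (pvPB l)).map (fun t => t.1)).map (fun c => (l, c)) := by
  rw [List.filter_map, List.filter_filter, List.map_map]
  have hfil : zs.filter (fun a => ((fun x : String × String => x.1 == l) ∘
        (fun t : String × String × Bool => (t.2.1, t.1))) a && pvPA a) = zs.filter (pvPB l) := by
    apply List.filter_congr
    intro t _
    simp only [Function.comp]
    by_cases hb : t.2.1 = l
    · subst hb; simp [pvPA, pvPB, hl, Bool.and_comm]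
    · have hf : (t.2.1 == l) = false := by simp [hb]
      simp [pvPA, pvPB, hf]
  rw [hfil]
  apply List.map_congr_left
  intro t ht
  have hmem := (List.mem_filter.mp ht).2
  have hb : t.2.1 = l := by
    simp [pvPB] at hmem; exact hmem.2
  simp [Function.comp, hb]

theorem pv_klex_mono (l₁ l₂ : String) (a b : String)
    (h : PySem.Dict.getD pvVBL l₁ 0 < PySem.Dict.getD pvVBL l₂ 0) :
    pvKlex (l₁, a) ≤ pvKlex (l₂, b) := by
  simp only [pvKlex]
  rw [Prod.Lex.le_iff]
  exact Or.inl h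

theorem pv_klex_le_same (l : String) (a b : String) (h : a ≤ b) :
    pvKlex (l, a) ≤ pvKlex (l, b) := by
  simp only [pvKlex]
  rw [Prod.Lex.le_iff]
  exact Or.inr ⟨rfl, h⟩

-- each chunk of ys is pairwise ≤ under pvKlex
theorem pv_chunk_pairwise (l : String) (b : List String) :
    List.Pairwise (fun x y => pvKlex x ≤ pvKlex y)
      ((PySem.List.sorted b (fun x => x)).map (fun c => (l, c))) := by
  rw [List.pairwise_map]
  exact (PySem.List.sorted_pairwise b (fun x => x)).imp (fun h => pv_klex_le_same _ _ _ h)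

-- klex is injective on pairs whose first component is a valid business line
theorem pv_klex_inj (a b : String × String)
    (ha : a.1 = "electronics" ∨ a.1 = "grocery" ∨ a.1 = "pharmacy" ∨ a.1 = "restaurant")
    (hb : b.1 = "electronics" ∨ b.1 = "grocery" ∨ b.1 = "pharmacy" ∨ b.1 = "restaurant")
    (h : pvKlex a = pvKlex b) : a = b := by
  simp only [pvKlex] at h
  have h' := toLex.injective h
  injection h' with h1 h2
  have hfst : a.1 = b.1 := by
    rcases ha with h | h | h | h <;> rcases hb with h'' | h'' | h'' | h'' <;>
      rw [h, h''] <;> rw [h, h''] at h1 <;> first | rfl | (exfalso; revert h1; decide)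
  exact Prod.ext hfst h2

-- the four-way partition of V, as a permutation
theorem pv_partition (V : List (String × String))
    (hV : ∀ x ∈ V, x.1 = "electronics" ∨ x.1 = "grocery" ∨ x.1 = "pharmacy" ∨ x.1 = "restaurant") :
    (V.filter (fun x => x.1 == "electronics") ++ (V.filter (fun x => x.1 == "grocery") ++
      (V.filter (fun x => x.1 == "pharmacy") ++ V.filter (fun x => x.1 == "restaurant")))).Perm V := by
  have h1 := List.filter_append_perm (fun x : String × String => x.1 == "electronics") V
  set W1 := V.filter (fun x : String × String => !(x.1 == "electronics")) with hW1
  have h2 := List.filter_append_perm (fun x : String × String => x.1 == "grocery") W1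
  set W2 := W1.filter (fun x : String × String => !(x.1 == "grocery")) with hW2
  have h3 := List.filter_append_perm (fun x : String × String => x.1 == "pharmacy") W2
  set W3 := W2.filter (fun x : String × String => !(x.1 == "pharmacy")) with hW3
  have hg : W1.filter (fun x : String × String => x.1 == "grocery")
      = V.filter (fun x => x.1 == "grocery") := by
    rw [hW1, List.filter_filter]
    apply List.filter_congr
    intro x _
    by_cases h : x.1 = "grocery"
    · simp [h]
    · have hf : (x.1 == "grocery") = false := by simp [h]
      simp [hf]
  have hp : W2.filter (fun x : String × String => x.1 == "pharmacy")
      = V.filter (fun x => x.1 == "pharmacy") := by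
    rw [hW2, hW1, List.filter_filter, List.filter_filter]
    apply List.filter_congr
    intro x _
    by_cases h : x.1 = "pharmacy"
    · simp [h]
    · have hf : (x.1 == "pharmacy") = false := by simp [h]
      simp [hf]
  have hr : W3.filter (fun x : String × String => x.1 == "restaurant")
      = V.filter (fun x => x.1 == "restaurant") := by
    rw [hW3, hW2, hW1, List.filter_filter, List.filter_filter, List.filter_filter]
    apply List.filter_congr
    intro x _
    by_cases h : x.1 = "restaurant"
    · simp [h]
    · have hf : (x.1 == "restaurant") = false := by simp [h]
      simp [hf]
  have hnil : W3.filter (fun x : String × String => !(x.1 == "restaurant")) = [] := by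
    rw [hW3, hW2, hW1, List.filter_filter, List.filter_filter, List.filter_filter]
    rw [List.filter_eq_nil_iff]
    intro x hx
    rcases hV x hx with h | h | h | h <;> simp [h]
  have h4 : (W3.filter (fun x : String × String => x.1 == "restaurant")).Perm W3 := by
    have := List.filter_append_perm (fun x : String × String => x.1 == "restaurant") W3
    rwa [hnil, List.append_nil] at this
  have w3r : (V.filter (fun x => x.1 == "restaurant")).Perm W3 := by
    rw [← hr]; exact h4
  have s3 : (V.filter (fun x => x.1 == "pharmacy")
      ++ V.filter (fun x => x.1 == "restaurant")).Perm W2 :=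
    (List.Perm.append_left _ w3r).trans (by rw [← hp]; exact h3)
  have s2 : (V.filter (fun x => x.1 == "grocery") ++ (V.filter (fun x => x.1 == "pharmacy")
      ++ V.filter (fun x => x.1 == "restaurant"))).Perm W1 :=
    (List.Perm.append_left _ s3).trans (by rw [← hg]; exact h2)
  exact (List.Perm.append_left _ s2).trans h1

-- ===== VERDICT (by name: the statement is the Claim_ definition above) =====
theorem couponCodes_spec : Claim_equal_couponCodes := by
  intro code businessLine isActive _
  unfold Spec_couponCodes couponCodes couponCodes_alt
  set zs := code.zip (businessLine.zip isActive) with hzs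
  rw [pv_foldA, pv_foldB]
  simp only [List.nil_append]
  set V := (zs.filter pvPA).map (fun t => (t.2.1, t.1)) with hV
  set bE := (zs.filter (pvPB "electronics")).map (fun t => t.1) with hbE
  set bG := (zs.filter (pvPB "grocery")).map (fun t => t.1) with hbG
  set bP := (zs.filter (pvPB "pharmacy")).map (fun t => t.1) with hbP
  set bR := (zs.filter (pvPB "restaurant")).map (fun t => t.1) with hbR
  rw [pv_sorted2_eq_sorted_lex]
  have hVmem : ∀ x ∈ V, x.1 = "electronics" ∨ x.1 = "grocery" ∨ x.1 = "pharmacy"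
      ∨ x.1 = "restaurant" := by
    intro x hx
    rw [hV] at hx
    obtain ⟨t, ht, rfl⟩ := List.mem_map.mp hx
    have hpa := (List.mem_filter.mp ht).2
    have : (pvVBL.get? t.2.1).isSome = true := by
      simp [pvPA] at hpa; exact hpa.1.2
    exact (pv_get?_isSome _).mp this
  set ys := ((PySem.List.sorted bE (fun x => x)).map (fun c => ("electronics", c))) ++
      (((PySem.List.sorted bG (fun x => x)).map (fun c => ("grocery", c))) ++
      (((PySem.List.sorted bP (fun x => x)).map (fun c => ("pharmacy", c))) ++
      ((PySem.List.sorted bR (fun x => x)).map (fun c => ("restaurant", c))))) with hys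
  have hymem : ∀ x ∈ ys, x.1 = "electronics" ∨ x.1 = "grocery" ∨ x.1 = "pharmacy"
      ∨ x.1 = "restaurant" := by
    intro x hx
    rw [hys] at hx
    simp only [List.mem_append, List.mem_map] at hx
    rcases hx with ⟨c, _, rfl⟩ | ⟨c, _, rfl⟩ | ⟨c, _, rfl⟩ | ⟨c, _, rfl⟩ <;> simp
  have hperm : ys.Perm V := by
    have he' : (pvVBL.get? "electronics").isSome = true := by decide
    have hg' : (pvVBL.get? "grocery").isSome = true := by decide
    have hp' : (pvVBL.get? "pharmacy").isSome = true := by decide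
    have hr' : (pvVBL.get? "restaurant").isSome = true := by decide
    have chunk : ∀ (l : String), (pvVBL.get? l).isSome = true →
        ((PySem.List.sorted ((zs.filter (pvPB l)).map (fun t => t.1)) (fun x => x)).map
          (fun c => (l, c))).Perm (V.filter (fun x => x.1 == l)) := by
      intro l hl
      rw [hV, pv_filter_V zs l hl]
      exact (PySem.List.sorted_perm _ _ _).map _
    refine List.Perm.trans ?_ (pv_partition V hVmem)
    rw [hys, hbE, hbG, hbP, hbR]
    exact ((chunk _ he').append ((chunk _ hg').append ((chunk _ hp').append (chunk _ hr'))))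
  have cross : ∀ (l₁ l₂ : String), PySem.Dict.getD pvVBL l₁ 0 < PySem.Dict.getD pvVBL l₂ 0 →
      ∀ (u v : List String), ∀ a ∈ (PySem.List.sorted u (fun x => x)).map (fun c => (l₁, c)),
      ∀ b ∈ (PySem.List.sorted v (fun x => x)).map (fun c => (l₂, c)),
      pvKlex a ≤ pvKlex b := by
    intro l₁ l₂ hlt u v a ha b hb
    obtain ⟨c, _, rfl⟩ := List.mem_map.mp ha
    obtain ⟨c', _, rfl⟩ := List.mem_map.mp hb
    exact pv_klex_mono _ _ _ _ hlt
  have hypair : List.Pairwise (fun a b => pvKlex a ≤ pvKlex b) ys := by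
    rw [hys]
    rw [List.pairwise_append, List.pairwise_append, List.pairwise_append]
    refine ⟨pv_chunk_pairwise _ _, ⟨pv_chunk_pairwise _ _, ⟨pv_chunk_pairwise _ _,
      pv_chunk_pairwise _ _, ?_⟩, ?_⟩, ?_⟩
    · exact cross _ _ (by decide) _ _
    · intro a ha b hb
      rcases List.mem_append.mp hb with h | h
      · exact cross _ _ (by decide) _ _ a ha b h
      · exact cross _ _ (by decide) _ _ a ha b h
    · intro a ha b hb
      rcases List.mem_append.mp hb with h | h'
      · exact cross _ _ (by decide) _ _ a ha b h
      · rcases List.mem_append.mp h' with h | h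
        · exact cross _ _ (by decide) _ _ a ha b h
        · exact cross _ _ (by decide) _ _ a ha b h
  have hsorted : PySem.List.sorted V pvKlex = ys := by
    apply List.Perm.eq_of_pairwise (le := fun a b => pvKlex a ≤ pvKlex b)
    · intro a b ha hb h1 h2
      exact pv_klex_inj a b (hVmem a ((PySem.List.mem_sorted _ _ _ a).mp ha)) (hymem b hb)
        (le_antisymm h1 h2)
    · exact PySem.List.sorted_pairwise V pvKlex
    · exact hypair
    · exact ((PySem.List.sorted_perm V pvKlex false).trans hperm.symm)
  show (PySem.List.sorted V (fun x => toLex (PySem.Dict.getD pvVBL x.1 0, x.2))).map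
      (fun x => x.2) = _
  have : (fun x : String × String => toLex (PySem.Dict.getD pvVBL x.1 0, x.2)) = pvKlex := rfl
  rw [this, hsorted, hys]
  simp [List.map_map]
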